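-- pv_equiv track=rewrite | github.com/cheol-95/Algorithm | 159. balloon/balloon.py | solution
-- ===== SOURCE A (Python) =====
-- def solution(a):
--     result = 1
--     length = len(a)
--     left, right = a[0], a[-1]
--     maps = [[0 for _ in range(length)] for q in range(2)]
--
--     for idx in range(length):
--         if left > a[idx]:
--             left = a[idx]
--             maps[0][idx] = True
--
--     for idx in range(length-1, -1, -1):
--         if right > a[idx]:
--             right = a[idx]
--             maps[1][idx] = True
--
--     for map in maps:
--         result += map.count(True)
--
--     return result
-- ===== SOURCE B (Python) =====
-- def solution(a):
--     # Empty input is excluded by Pre_: A raises IndexError there; this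
--     # implementation returns 1 without raising.
--     def strict_prefix_mins(xs):
--         # indices whose element is strictly below the whole prefix before it,
--         # each minimum recomputed from scratch with the min() builtin
--         return sum(xs[i] < min(xs[:i]) for i in range(1, len(xs)))
--     return 1 + strict_prefix_mins(a) + strict_prefix_mins(a[::-1])
-- ===== Notes on version B (the rewrite author's own statement) =====
-- stated objective: alternative
-- what changed: Replaces A's single-pass running-minimum state machine with boolean marker tables by a stateless nested-scan characterisation: an index counts iff its element is strictly below min() of the entire prefix before it, computed from scratch per index, applied to the list and to its reversal.
import Mathlib
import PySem

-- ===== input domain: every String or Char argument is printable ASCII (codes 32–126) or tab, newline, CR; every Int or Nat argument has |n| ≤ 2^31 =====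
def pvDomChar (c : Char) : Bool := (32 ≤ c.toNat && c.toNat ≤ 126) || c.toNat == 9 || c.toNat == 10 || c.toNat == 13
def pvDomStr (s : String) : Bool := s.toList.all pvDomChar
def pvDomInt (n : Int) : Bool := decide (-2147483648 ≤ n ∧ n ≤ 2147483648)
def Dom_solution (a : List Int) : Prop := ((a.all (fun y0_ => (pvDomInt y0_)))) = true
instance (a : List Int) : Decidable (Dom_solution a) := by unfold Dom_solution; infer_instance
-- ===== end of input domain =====

-- B replaces A's single-pass running-minimum state machine (with marker tables)
-- by a stateless nested-scan characterisation: count indices strictly below the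
-- min() of their whole prefix, on the list and on its reversal (alternative; O(n^2) vs A's O(n)).
-- Equivalence is about the return value; neither program mutates its argument.

-- ===== PORT A =====
-- Python booleans: maps holds 0s overwritten by True; map.count(True) counts the
-- True entries, so the tables are ported as List Bool (0 ↦ false).
def solution (a : List Int) : Int :=
  let length : Int := (a.length : Int)
  let left : Int := PySem.List.pyGetD a 0 0      -- Python a[0]; raises on the empty list (outside Pre_)
  let right : Int := PySem.List.pyGetD a (-1) 0  -- a[-1]
  let s0 := (PySem.List.pyRange 0 length 1).foldl
    (fun (s : Int × List Bool) idx =>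
      if s.1 > PySem.List.pyGetD a idx 0 then
        (PySem.List.pyGetD a idx 0, s.2.set idx.toNat true)
      else s)
    (left, List.replicate a.length false)
  let s1 := (PySem.List.pyRange (length - 1) (-1) (-1)).foldl
    (fun (s : Int × List Bool) idx =>
      if s.1 > PySem.List.pyGetD a idx 0 then
        (PySem.List.pyGetD a idx 0, s.2.set idx.toNat true)
      else s)
    (right, List.replicate a.length false)
  1 + (s0.2.count true : Int) + (s1.2.count true : Int)

-- ===== PORT B =====
-- sum(xs[i] < min(xs[:i]) for i in range(1, len(xs))); the .getD 0 only
-- totalises min? — the slice is nonempty for every index the range produces.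
def strictPrefixMins (xs : List Int) : Int :=
  (PySem.List.pyRange 1 (xs.length : Int) 1).foldl
    (fun (c : Int) i =>
      c + (if PySem.List.pyGetD xs i 0 <
              (PySem.List.min? (PySem.List.slice xs none (some i)) (fun y => y)).getD 0
           then 1 else 0))
    0

def solution_alt (a : List Int) : Int :=
  1 + strictPrefixMins a + strictPrefixMins (((PySem.List.slice? a none none (-1)).getD []))  -- a[::-1]

-- ===== PRECONDITION & SPEC =====
-- Pre_ excludes exactly the empty list, on which A raises IndexError at its first-element access (B returns a value there).
def Pre_solution (a : List Int) : Prop := a ≠ []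
instance (a : List Int) : Decidable (Pre_solution a) := by unfold Pre_solution; infer_instance
def pvWitness_solution : List Int := [3, 1, 2]

def Spec_solution (a : List Int) (out : Int) : Prop := out = solution_alt a
instance (a : List Int) (out : Int) : Decidable (Spec_solution a out) := by unfold Spec_solution; infer_instance

-- ===== CLAIM (what is proved, stated in full; the proofs are below) =====
def Claim_equal_solution : Prop := ∀ (a : List Int), Dom_solution a → Pre_solution a → Spec_solution a (solution a)

-- ===== LEMMAS AND PROOFS =====

-- dcount m xs = number of strict running-minimum drops of xs starting from minimum m
def dcount : Int → List Int → Int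
  | _, [] => 0
  | m, x :: t => if m > x then 1 + dcount x t else dcount m t

-- mdrops m xs = number of elements strictly below the minimum of m and everything before them
def mdrops : Int → List Int → Int
  | _, [] => 0
  | m, x :: t => (if x < m then 1 else 0) + mdrops (min m x) t

theorem dcount_eq_mdrops (t : List Int) (m : Int) : dcount m t = mdrops m t := by
  induction t generalizing m with
  | nil => rfl
  | cons x t ih =>
    simp only [dcount, mdrops]
    by_cases h : x < m
    · rw [if_pos (by omega), if_pos h, min_eq_right (by omega), ih]
    · rw [if_neg (by omega), if_neg h, min_eq_left (by omega), ih]; ring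

-- min of a nonempty list, as Python's min() computes it
def pmin : List Int → Int
  | [] => 0
  | y :: t => t.foldl min y

theorem min?_getD_pmin (xs : List Int) (h : xs ≠ []) :
    (PySem.List.min? xs (fun y => y)).getD 0 = pmin xs := by
  cases xs with
  | nil => exact absurd rfl h
  | cons y t => rw [PySem.List.min?_id_cons]; rfl

theorem pmin_take_succ (xs : List Int) (i : Nat) (h1 : 1 ≤ i) (hi : i < xs.length) :
    pmin (xs.take (i + 1)) = min (pmin (xs.take i)) xs[i] := by
  have htake : xs.take (i + 1) = xs.take i ++ [xs[i]] := by
    rw [List.take_add_one]; simp [hi]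
  rw [htake]
  obtain ⟨y, t, hyt⟩ : ∃ y t, xs.take i = y :: t := by
    cases hx : xs.take i with
    | nil =>
      have : (xs.take i).length = i := by simp; omega
      rw [hx] at this; simp at this; omega
    | cons y t => exact ⟨y, t, rfl⟩
  rw [hyt]
  simp only [pmin, List.cons_append, List.foldl_append, List.foldl]

-- B's fold over range(i, n) computes mdrops from the minimum of the processed prefix
theorem spm_loop (xs : List Int) (fuel i : Nat) (h1 : 1 ≤ i) (hfuel : xs.length - i ≤ fuel) (c : Int) :
    ((PySem.List.pyRange (i : Int) (xs.length : Int) 1).foldl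
      (fun (c : Int) j =>
        c + (if PySem.List.pyGetD xs j 0 <
                (PySem.List.min? (PySem.List.slice xs none (some j)) (fun y => y)).getD 0
             then 1 else 0))
      c)
    = c + mdrops (pmin (xs.take i)) (xs.drop i) := by
  induction fuel generalizing i c with
  | zero =>
    have h : xs.length ≤ i := by omega
    rw [PySem.List.pyRange_one_eq_nil (by exact_mod_cast h), List.drop_eq_nil_of_le h]
    simp [mdrops]
  | succ n ih =>
    by_cases hi : i < xs.length
    · rw [PySem.List.pyRange_one_cons (by exact_mod_cast hi)]
      simp only [List.foldl]
      have hv : PySem.List.pyGetD xs (i : Int) 0 = xs[i] := by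
        rw [PySem.List.pyGetD_eq_getElem xs 0 (by exact_mod_cast (Nat.zero_le i)) (by exact_mod_cast hi)]
        simp
      have hslice : PySem.List.slice xs none (some (i : Int)) = xs.take i :=
        PySem.List.slice_to_natCast xs i
      have hne : xs.take i ≠ [] := by
        intro hx
        have : (xs.take i).length = i := by simp; omega
        rw [hx] at this; simp at this; omega
      have hdrop : xs.drop i = xs[i] :: xs.drop (i + 1) := List.drop_eq_getElem_cons hi
      have hcast : ((i : Int) + 1) = ((i + 1 : Nat) : Int) := by push_cast; ring
      rw [hv, hslice, min?_getD_pmin _ hne, hcast, ih (i + 1) (by omega) (by omega)]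
      rw [hdrop]
      simp only [mdrops, pmin_take_succ xs i h1 hi]
      ring
    · have h : xs.length ≤ i := by omega
      rw [PySem.List.pyRange_one_eq_nil (by exact_mod_cast h), List.drop_eq_nil_of_le h]
      simp [mdrops]

theorem spm_cons (x : Int) (t : List Int) : strictPrefixMins (x :: t) = mdrops x t := by
  unfold strictPrefixMins
  have := spm_loop (x :: t) (x :: t).length 1 le_rfl (by omega) 0
  simp only [Nat.cast_one] at this
  rw [this]
  simp [pmin]

-- counting after set true at a false position
theorem count_set_true (l : List Bool) (i : Nat) (hi : i < l.length)
    (hf : l.getD i false = false) :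
    (l.set i true).count true = l.count true + 1 := by
  induction l generalizing i with
  | nil => simp at hi
  | cons b t ih =>
    cases i with
    | zero =>
      simp only [List.getD, List.getElem?_cons_zero, Option.getD_some] at hf
      simp [List.set, hf]
    | succ j =>
      simp only [List.getD, List.getElem?_cons_succ] at hf
      simp only [List.set, List.count_cons, ih j (by simpa using hi) hf]
      ring

-- A's forward loop: fold over range(i, n) counting via marker table = dcount on drop i
theorem loopA_forward (a : List Int) (fuel i : Nat) (hfuel : a.length - i ≤ fuel)
    (left : Int) (maps : List Bool) (hlen : maps.length = a.length)
    (hf : ∀ j, i ≤ j → maps.getD j false = false) :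
    (((PySem.List.pyRange (i : Int) (a.length : Int) 1).foldl
      (fun (s : Int × List Bool) idx =>
        if s.1 > PySem.List.pyGetD a idx 0 then
          (PySem.List.pyGetD a idx 0, s.2.set idx.toNat true)
        else s)
      (left, maps)).2.count true : Int)
    = maps.count true + dcount left (a.drop i) := by
  induction fuel generalizing i left maps with
  | zero =>
    have h1 : a.length ≤ i := by omega
    rw [PySem.List.pyRange_one_eq_nil (by exact_mod_cast h1),
        List.drop_eq_nil_of_le h1]
    simp [dcount]
  | succ n ih =>
    by_cases hi : i < a.length
    · rw [PySem.List.pyRange_one_cons (by exact_mod_cast hi)]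
      simp only [List.foldl]
      have hv : PySem.List.pyGetD a (i : Int) 0 = a[i] := by
        rw [PySem.List.pyGetD_eq_getElem a 0 (by exact_mod_cast (Nat.zero_le i)) (by exact_mod_cast hi)]
        simp
      have hdrop : a.drop i = a[i] :: a.drop (i + 1) := List.drop_eq_getElem_cons hi
      by_cases hgt : left > a[i]
      · rw [if_pos (by rw [hv]; exact hgt)]
        have hsetlen : (maps.set (Int.toNat (i:Int)) true).length = a.length := by
          simpa using hlen
        have : ((i : Int)).toNat = i := by simp
        rw [this] at hsetlen ⊢
        have hcast : ((i : Int) + 1) = ((i + 1 : Nat) : Int) := by push_cast; ring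
        rw [hv, hcast, ih (i+1) (by omega) a[i] (maps.set i true) hsetlen
          (by
            intro j hj
            rw [List.getD, List.getElem?_set_ne (by omega), ← List.getD]
            exact hf j (by omega))]
        rw [hdrop]
        simp only [dcount, if_pos hgt]
        rw [count_set_true maps i (by omega) (hf i le_rfl)]
        push_cast; ring
      · rw [if_neg (by rw [hv]; exact hgt)]
        have hcast : ((i : Int) + 1) = ((i + 1 : Nat) : Int) := by push_cast; ring
        rw [hcast, ih (i+1) (by omega) left maps hlen (fun j hj => hf j (by omega))]
        rw [hdrop]
        simp only [dcount, if_neg hgt]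
    · have h1 : a.length ≤ i := by omega
      rw [PySem.List.pyRange_one_eq_nil (by exact_mod_cast h1),
          List.drop_eq_nil_of_le h1]
      simp [dcount]

-- A's backward loop: fold over range(i, -1, -1) = dcount on (take (i+1)).reverse
theorem loopA_backward (a : List Int) (fuel : Nat) (i : Int) (hi : i < (a.length : Int))
    (hfuel : (i + 1).toNat ≤ fuel)
    (right : Int) (maps : List Bool) (hlen : maps.length = a.length)
    (hf : ∀ j : Nat, (j : Int) ≤ i → maps.getD j false = false) :
    (((PySem.List.pyRange i (-1) (-1)).foldl
      (fun (s : Int × List Bool) idx =>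
        if s.1 > PySem.List.pyGetD a idx 0 then
          (PySem.List.pyGetD a idx 0, s.2.set idx.toNat true)
        else s)
      (right, maps)).2.count true : Int)
    = maps.count true + dcount right ((a.take (i + 1).toNat).reverse) := by
  induction fuel generalizing i right maps with
  | zero =>
    have h1 : i ≤ -1 := by omega
    rw [PySem.List.pyRange_neg_one_eq_nil h1]
    have : (i + 1).toNat = 0 := by omega
    simp [this, dcount]
  | succ n ih =>
    by_cases hneg : i < 0
    · rw [PySem.List.pyRange_neg_one_eq_nil (by omega)]
      have : (i + 1).toNat = 0 := by omega
      simp [this, dcount]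
    · have h0 : 0 ≤ i := by omega
      have hiN : i.toNat < a.length := by omega
      rw [PySem.List.pyRange_neg_one_cons (by omega)]
      simp only [List.foldl]
      have hv : PySem.List.pyGetD a i 0 = a[i.toNat] := PySem.List.pyGetD_eq_getElem a 0 h0 hi
      have htake : a.take (i + 1).toNat = a.take i.toNat ++ [a[i.toNat]] := by
        have : (i + 1).toNat = i.toNat + 1 := by omega
        rw [this, List.take_add_one]
        simp [hiN]
      have hrev : (a.take (i + 1).toNat).reverse = a[i.toNat] :: (a.take i.toNat).reverse := by
        rw [htake]; simp
      by_cases hgt : right > a[i.toNat]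
      · rw [if_pos (by rw [hv]; exact hgt)]
        have hsetlen : (maps.set i.toNat true).length = a.length := by simpa using hlen
        rw [hv, ih (i - 1) (by omega) (by omega) a[i.toNat] (maps.set i.toNat true) hsetlen
          (by
            intro j hj
            rw [List.getD, List.getElem?_set_ne (by omega), ← List.getD]
            exact hf j (by omega))]
        have : (i - 1 + 1).toNat = i.toNat := by omega
        rw [this, hrev]
        simp only [dcount, if_pos hgt]
        rw [count_set_true maps i.toNat (by omega) (hf i.toNat (by omega))]
        push_cast; ring
      · rw [if_neg (by rw [hv]; exact hgt)]
        rw [ih (i - 1) (by omega) (by omega) right maps hlen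
          (fun j hj => hf j (by omega))]
        have : (i - 1 + 1).toNat = i.toNat := by omega
        rw [this, hrev]
        simp only [dcount, if_neg hgt]

theorem dcount_self_cons (m : Int) (t : List Int) : dcount m (m :: t) = dcount m t := by
  simp [dcount]

theorem replicate_getD_false (n j : Nat) : (List.replicate n false).getD j false = false := by
  rcases lt_or_ge j n with h | h
  · simp [List.getD, h]
  · rw [List.getD, List.getElem?_eq_none (by simpa using h)]; rfl

-- ===== VERDICT (by name: the statement is the Claim_ definition above) =====
theorem solution_spec : Claim_equal_solution := by
  intro a _ hpre
  unfold Spec_solution solution solution_alt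
  obtain ⟨x, t, rfl⟩ : ∃ x t, a = x :: t := by
    cases a with
    | nil => exact absurd rfl hpre
    | cons x t => exact ⟨x, t, rfl⟩
  set a := x :: t with ha
  have hne : a ≠ [] := by simp [ha]
  simp only [PySem.List.slice?_none_none_neg_one, Option.getD_some]
  have hleft : PySem.List.pyGetD a 0 0 = x := by simp [ha, PySem.List.pyGetD_zero_cons]
  have hright : PySem.List.pyGetD a (-1) 0 = a.getLast hne := PySem.List.pyGetD_neg_one a 0 hne
  -- forward loop
  have hfwd := loopA_forward a a.length 0 (by omega) (PySem.List.pyGetD a 0 0)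
    (List.replicate a.length false) (by simp)
    (fun j _ => replicate_getD_false _ j)
  -- backward loop
  have hbwd := loopA_backward a a.length ((a.length : Int) - 1) (by omega) (by omega)
    (PySem.List.pyGetD a (-1) 0) (List.replicate a.length false) (by simp)
    (fun j hj => replicate_getD_false _ j)
  simp only [Nat.cast_zero] at hfwd
  rw [hfwd, hbwd]
  have htake : (a.take ((a.length : Int) - 1 + 1).toNat) = a := by
    have h2 : ((a.length : Int) - 1 + 1).toNat = a.length := by omega
    rw [h2, List.take_length]
  rw [htake]
  -- relate dcounts to B's nested-scan counts
  have hd1 : dcount (PySem.List.pyGetD a 0 0) (a.drop 0) = strictPrefixMins a := by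
    rw [hleft, List.drop_zero, ha, dcount_self_cons, dcount_eq_mdrops, ← spm_cons]
  have harev : a.reverse = a.getLast hne :: a.dropLast.reverse := by
    conv_lhs => rw [← List.dropLast_append_getLast hne]
    simp
  have hd2 : dcount (PySem.List.pyGetD a (-1) 0) a.reverse = strictPrefixMins a.reverse := by
    rw [hright, harev, dcount_self_cons, dcount_eq_mdrops, ← spm_cons]
  rw [hd1, hd2]
  simp [List.count_replicate]
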